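-- pv_equiv track=rewrite | github.com/cvlab-ai/splinter | inference_engine/scripts/evaluation_test.py | answer_string_to_list
-- ===== SOURCE A (Python) =====
-- def answer_string_to_list(answer_str):
--     options = ['A', 'B', 'C', 'D']
--     answer_list = [0, 0, 0, 0]
--     for char in answer_str:
--         if char in options:
--             idx = options.index(char)
--             answer_list[idx] = 1
--     return answer_list
-- ===== SOURCE B (Python) =====
-- def answer_string_to_list(answer_str):
--     return [1 if opt in answer_str else 0 for opt in ['A', 'B', 'C', 'D']]
-- ===== Notes on version B (the rewrite author's own statement) =====
-- stated objective: idiomatic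
-- what changed: Inverts the traversal: instead of looping over the input's characters and using options.index to locate a slot to mutate, B builds the length-4 list directly by mapping each fixed option to a substring-membership test against the string.
import Mathlib
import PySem

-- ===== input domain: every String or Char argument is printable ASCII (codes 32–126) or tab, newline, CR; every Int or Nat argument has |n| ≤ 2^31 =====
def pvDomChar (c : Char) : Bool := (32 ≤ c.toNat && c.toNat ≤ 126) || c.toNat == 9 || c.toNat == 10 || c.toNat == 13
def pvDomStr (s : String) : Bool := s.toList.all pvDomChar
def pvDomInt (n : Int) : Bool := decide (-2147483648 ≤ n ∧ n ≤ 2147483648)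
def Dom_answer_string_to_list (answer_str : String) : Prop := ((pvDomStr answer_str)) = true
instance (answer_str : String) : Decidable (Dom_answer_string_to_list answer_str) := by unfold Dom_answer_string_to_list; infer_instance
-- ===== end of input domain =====

-- B inverts the traversal (maps each fixed option to a membership test instead of indexing per input char): idiomatic, same cost.

-- ===== PORT A =====
-- port of A's loop body: if char is in options, find its index with options.index and set that slot to 1
def astlStep (answer_list : List Int) (char : Char) : List Int :=
  if char ∈ ['A', 'B', 'C', 'D'] then
    match PySem.List.index? ['A', 'B', 'C', 'D'] char with
    | some idx => answer_list.set idx 1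
    | none => answer_list
  else answer_list

-- port of A: fold the loop body over the string's characters, starting from [0, 0, 0, 0]
def answer_string_to_list (answer_str : String) : List Int :=
  answer_str.toList.foldl astlStep [0, 0, 0, 0]

-- ===== PORT B =====
-- port of B: map each fixed option to a membership test against the string
def answer_string_to_list_alt (answer_str : String) : List Int :=
  ['A', 'B', 'C', 'D'].map (fun opt => if opt ∈ answer_str.toList then (1 : Int) else 0)

-- ===== PRECONDITION & SPEC =====
def Spec_answer_string_to_list (answer_str : String) (out : List Int) : Prop := out = answer_string_to_list_alt answer_str
instance (answer_str : String) (out : List Int) : Decidable (Spec_answer_string_to_list answer_str out) := by unfold Spec_answer_string_to_list; infer_instance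

-- ===== CLAIM (what is proved, stated in full; the proofs are below) =====
def Claim_equal_answer_string_to_list : Prop := ∀ (answer_str : String), Dom_answer_string_to_list answer_str → Spec_answer_string_to_list answer_str (answer_string_to_list answer_str)

-- ===== LEMMAS AND PROOFS =====
-- invariant: folding A's update over l, started from any 4-slot state, yields per-slot membership-or-initial
theorem astl_fold (l : List Char) (a b c d : Int) :
    l.foldl astlStep [a, b, c, d]
    = [if 'A' ∈ l then 1 else a, if 'B' ∈ l then 1 else b,
       if 'C' ∈ l then 1 else c, if 'D' ∈ l then 1 else d] := by
  induction l generalizing a b c d with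
  | nil => simp
  | cons x xs ih =>
    simp only [List.foldl_cons]
    by_cases hA : x = 'A'
    · subst hA; rw [show astlStep [a, b, c, d] 'A' = [1, b, c, d] from rfl, ih]; simp
    · by_cases hB : x = 'B'
      · subst hB; rw [show astlStep [a, b, c, d] 'B' = [a, 1, c, d] from rfl, ih]; simp
      · by_cases hC : x = 'C'
        · subst hC; rw [show astlStep [a, b, c, d] 'C' = [a, b, 1, d] from rfl, ih]; simp
        · by_cases hD : x = 'D'
          · subst hD; rw [show astlStep [a, b, c, d] 'D' = [a, b, c, 1] from rfl, ih]; simp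
          · have hstep : astlStep [a, b, c, d] x = [a, b, c, d] := by
              simp [astlStep, hA, hB, hC, hD]
            rw [hstep, ih]
            simp [List.mem_cons, Ne.symm hA, Ne.symm hB, Ne.symm hC, Ne.symm hD]

-- ===== VERDICT (by name: the statement is the Claim_ definition above) =====
theorem answer_string_to_list_spec : Claim_equal_answer_string_to_list := by
  intro s _
  unfold Spec_answer_string_to_list answer_string_to_list answer_string_to_list_alt
  rw [astl_fold]
  simp
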